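-- pv_equiv track=rewrite | github.com/rudolfKischer/comp321-assignment-solutions | assignment2/guess_the_data_structure.py | check_input_pairs
-- ===== SOURCE A (Python) =====
-- from queue import PriorityQueue
--
-- class Stack():
--
--     def __init__(self):
--         self.stack = []
--
--     def throw(self, x):
--         self.stack.append(x)
--
--     def remove(self):
--         if len(self.stack) > 0:
--             return self.stack.pop()
--         return None
--
-- class Queue():
--
--     def __init__(self):
--         self.queue = []
--
--     def throw(self, x):
--         self.queue.insert(0,x)
--
--     def remove(self):
--         if len(self.queue) > 0:
--             return self.queue.pop()
--         return None
--
-- class PQueue():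
--     def __init__(self):
--         self.pq = PriorityQueue()
--
--     def throw(self, x):
--         self.pq.put(-x)
--
--     def remove(self):
--         if self.pq.qsize() > 0:
--             return -self.pq.get()
--         return None
--
-- def check_input_pair(input_pair, data_structures):
--
--     mode = int(input_pair[0])
--     val = int(input_pair[1])
--
--     data_structures_to_remove = []
--
--     for name, structure in data_structures.items():
--
--         if mode == 1:
--             structure.throw(val)
--
--         if mode == 2:
--             removed_val = structure.remove()
--             if removed_val != val:
--                 data_structures_to_remove.append(name)
--
--     for name in data_structures_to_remove:
--         del data_structures[name]
--
-- def check_input_pairs(input_pairs):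
--
--     data_structures = {
--         'queue': Queue(),
--         'priority queue': PQueue(),
--         'stack': Stack()
--     }
--
--     for pair in input_pairs:
--         check_input_pair(pair, data_structures)
--
--     if len(data_structures) == 1:
--         data_structure = list(data_structures.items())[0][0]
--         return data_structure
--
--     if len(data_structures) > 1:
--         return 'not sure'
--
--     if len(data_structures) == 0:
--         return 'impossible'
-- ===== SOURCE B (Python) =====
-- def check_input_pairs(input_pairs):
--     def passes(pop):
--         # replay the whole op list against one structure; pop takes a nonempty buffer
--         # and returns (value, remaining buffer)
--         buf = []
--         for p in input_pairs:
--             mode, val = int(p[0]), int(p[1])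
--             if mode == 1:
--                 buf = buf + [val]
--             elif mode == 2:
--                 if not buf:
--                     return False
--                 r, buf = pop(buf)
--                 if r != val:
--                     return False
--         return True
--
--     def pop_queue(b):
--         return b[0], b[1:]
--
--     def pop_pq(b):
--         m = max(b)
--         i = b.index(m)
--         return m, b[:i] + b[i+1:]
--
--     def pop_stack(b):
--         return b[-1], b[:-1]
--
--     survivors = [name for name, pop in
--                  (('queue', pop_queue), ('priority queue', pop_pq), ('stack', pop_stack))
--                  if passes(pop)]
--
--     if len(survivors) == 1:
--         return survivors[0]
--     if len(survivors) > 1: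
--         return 'not sure'
--     if len(survivors) == 0:
--         return 'impossible'
-- ===== Notes on version B (the rewrite author's own statement) =====
-- stated objective: simpler
-- what changed: Instead of A's single interleaved pass that mutates a shrinking dict of three stateful class instances (marking and deleting failed structures after each operation), B runs three independent full replays of the operation list, one plain buffer-based checker per structure (queue/priority-queue/stack pops expressed directly on a list), collects the surviving names, and applies the same final one/many/none decision.
import Mathlib
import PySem

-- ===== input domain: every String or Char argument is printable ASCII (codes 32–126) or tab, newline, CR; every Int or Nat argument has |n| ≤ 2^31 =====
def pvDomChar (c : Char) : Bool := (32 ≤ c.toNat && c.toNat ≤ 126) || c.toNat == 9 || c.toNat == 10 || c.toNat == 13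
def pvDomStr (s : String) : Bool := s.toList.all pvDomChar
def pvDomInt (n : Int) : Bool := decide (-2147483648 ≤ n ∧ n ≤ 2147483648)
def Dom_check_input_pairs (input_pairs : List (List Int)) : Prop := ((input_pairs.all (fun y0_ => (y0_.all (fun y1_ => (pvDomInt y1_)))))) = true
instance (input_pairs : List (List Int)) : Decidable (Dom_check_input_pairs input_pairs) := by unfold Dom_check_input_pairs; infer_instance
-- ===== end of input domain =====

-- B replaces A's interleaved pass over a shrinking dict of stateful objects by three
-- independent per-structure replays of the whole operation list (objective: simpler).

-- ===== PORT A =====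
-- The three data-structure objects, modelled by their internal list state.
-- PQueue's heap is modelled as the multiset of its elements (value-faithful:
-- put = append, get = remove the first minimal element).
inductive DS
  | stack : List Int → DS
  | queue : List Int → DS
  | pq    : List Int → DS
deriving DecidableEq, Repr

def dsThrow : DS → Int → DS
  | .stack l, x => .stack (l ++ [x])      -- self.stack.append(x)
  | .queue l, x => .queue (x :: l)        -- self.queue.insert(0, x)
  | .pq l,    x => .pq (l ++ [-x])        -- self.pq.put(-x)

def dsRemove : DS → Option Int × DS
  | .stack l =>
      match PySem.List.pop? l with        -- self.stack.pop() if nonempty else None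
      | some (v, l') => (some v, .stack l')
      | none => (none, .stack l)
  | .queue l =>
      match PySem.List.pop? l with        -- self.queue.pop() if nonempty else None
      | some (v, l') => (some v, .queue l')
      | none => (none, .queue l)
  | .pq l =>
      match PySem.List.min? l (fun y => y) with   -- -self.pq.get() if nonempty else None
      | some m => (some (-m), .pq ((PySem.List.remove? l m).getD l))
      | none => (none, .pq l)

-- check_input_pair: one pass over the dict, then deletion of the failed names
-- (deletion of the marked entries = filter).
def checkPair (ds : List (String × DS)) (pair : List Int) : List (String × DS) :=
  match PySem.List.pyGet? pair 0, PySem.List.pyGet? pair 1 with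
  | some mode, some val =>
      let stepped := ds.map (fun ns =>
        let s1 := if mode = 1 then dsThrow ns.2 val else ns.2
        if mode = 2 then
          let rs := dsRemove s1
          (ns.1, rs.2, decide (rs.1 ≠ some val))
        else (ns.1, s1, false))
      (stepped.filter (fun t => !t.2.2)).map (fun t => (t.1, t.2.1))
  | _, _ => ds    -- Python raises IndexError here; excluded by Pre_

def check_input_pairs (input_pairs : List (List Int)) : String :=
  let init : List (String × DS) :=
    [("queue", DS.queue []), ("priority queue", DS.pq []), ("stack", DS.stack [])]
  let final := input_pairs.foldl checkPair init
  if final.length = 1 then (final.headD ("", DS.stack [])).1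
  else if final.length > 1 then "not sure"
  else "impossible"

-- ===== PORT B =====
-- pop_queue: b[0], b[1:]
def popQueueB (b : List Int) : Int × List Int := (b.headD 0, b.tail)
-- pop_pq: m = max(b); i = b.index(m); (m, b[:i] + b[i+1:])  — removing b[i] where
-- i = b.index(m) is removing the first occurrence of m.
def popPqB (b : List Int) : Int × List Int :=
  let m := ((PySem.List.max? b (fun y => y)).getD 0)
  (m, (PySem.List.remove? b m).getD b)
-- pop_stack: b[-1], b[:-1]
def popStackB (b : List Int) : Int × List Int := (b.getLastD 0, b.dropLast)

-- passes(pop): replay the whole op list against one structure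
def okRun (pop : List Int → Int × List Int) : List (List Int) → List Int → Bool
  | [], _ => true
  | p :: rest, buf =>
    match PySem.List.pyGet? p 0, PySem.List.pyGet? p 1 with
    | some mode, some val =>
        if mode = 1 then okRun pop rest (buf ++ [val])
        else if mode = 2 then
          if buf.isEmpty then false
          else
            let rb := pop buf
            if rb.1 = val then okRun pop rest rb.2 else false
        else okRun pop rest buf
    | _, _ => okRun pop rest buf    -- Python raises IndexError here; excluded by Pre_

def check_input_pairs_alt (input_pairs : List (List Int)) : String :=
  let cands : List (String × (List Int → Int × List Int)) :=
    [("queue", popQueueB), ("priority queue", popPqB), ("stack", popStackB)]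
  let survivors := (cands.filter (fun np => okRun np.2 input_pairs [])).map Prod.fst
  if survivors.length = 1 then survivors.headD ""
  else if survivors.length > 1 then "not sure"
  else "impossible"

-- ===== PRECONDITION & SPEC =====
-- A raises IndexError on any operation pair with fewer than two entries; Pre_ excludes those.
def Pre_check_input_pairs (input_pairs : List (List Int)) : Prop :=
  ∀ p ∈ input_pairs, 2 ≤ p.length
instance (input_pairs : List (List Int)) : Decidable (Pre_check_input_pairs input_pairs) := by
  unfold Pre_check_input_pairs; infer_instance

def pvWitness_check_input_pairs : List (List Int) := [[1, 3], [1, 5], [2, 5]]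

def Spec_check_input_pairs (input_pairs : List (List Int)) (out : String) : Prop := out = check_input_pairs_alt input_pairs
instance (input_pairs : List (List Int)) (out : String) : Decidable (Spec_check_input_pairs input_pairs out) := by unfold Spec_check_input_pairs; infer_instance

-- ===== CLAIM (what is proved, stated in full; the proofs are below) =====
def Claim_equal_check_input_pairs : Prop := ∀ (input_pairs : List (List Int)), Dom_check_input_pairs input_pairs → Pre_check_input_pairs input_pairs → Spec_check_input_pairs input_pairs (check_input_pairs input_pairs)

-- ===== LEMMAS AND PROOFS =====

-- per-structure step of A's check_input_pair (none = the structure got deleted)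
def stepA (pair : List Int) (s : DS) : Option DS :=
  match PySem.List.pyGet? pair 0, PySem.List.pyGet? pair 1 with
  | some mode, some val =>
      let s1 := if mode = 1 then dsThrow s val else s
      if mode = 2 then
        let rs := dsRemove s1
        if rs.1 = some val then some rs.2 else none
      else some s1
  | _, _ => some s

def runA (pairs : List (List Int)) (os : Option DS) : Option DS :=
  pairs.foldl (fun acc p => acc.bind (stepA p)) os

theorem checkPair_eq (ds : List (String × DS)) (pair : List Int) :
    checkPair ds pair = ds.filterMap (fun ns => (stepA pair ns.2).map ((ns.1, ·))) := by
  unfold checkPair stepA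
  cases PySem.List.pyGet? pair 0 with
  | none => simp
  | some mode =>
    cases PySem.List.pyGet? pair 1 with
    | none => simp
    | some val =>
      simp only
      induction ds with
      | nil => rfl
      | cons hd tl ih =>
        simp only [List.map_cons, List.filter_cons, List.filterMap_cons]
        by_cases h2 : mode = 2
        · subst h2
          simp at ih
          by_cases hv : (dsRemove hd.2).1 = some val <;> simp [hv, ih]
        · simp [h2] at ih
          simp [h2, ih]

theorem runA_cons (p : List Int) (rest : List (List Int)) (os : Option DS) :
    runA (p :: rest) os = runA rest (os.bind (stepA p)) := rfl

theorem runA_none (pairs : List (List Int)) : runA pairs none = none := by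
  induction pairs with
  | nil => rfl
  | cons p rest ih => simpa [runA_cons] using ih

theorem foldl_checkPair_eq (pairs : List (List Int)) (ds : List (String × DS)) :
    pairs.foldl checkPair ds = ds.filterMap (fun ns => (runA pairs (some ns.2)).map ((ns.1, ·))) := by
  induction pairs generalizing ds with
  | nil => simp [runA]
  | cons p rest ih =>
    rw [List.foldl_cons, checkPair_eq, ih, List.filterMap_filterMap]
    apply List.filterMap_congr
    intro ns _
    cases h : stepA p ns.2 with
    | none => simp [h, runA_cons, runA_none]
    | some s' => simp [h, runA_cons]

-- min over negations is the negation of max (first occurrences correspond)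
theorem foldl_min_neg (c : Int) (cs : List Int) :
    List.foldl min (-c) (cs.map (fun x => -x)) = -(List.foldl max c cs) := by
  induction cs generalizing c with
  | nil => rfl
  | cons d ds ih => simp [List.foldl_cons, min_neg_neg, ih]

theorem remove?_map_neg (buf : List Int) (m : Int) (hm : m ∈ buf) :
    PySem.List.remove? (buf.map (fun x => -x)) (-m) = (PySem.List.remove? buf m).map (List.map (fun x => -x)) := by
  induction buf with
  | nil => cases hm
  | cons c cs ih =>
    by_cases hc : c = m
    · subst hc
      simp [PySem.List.remove?_cons_self]
    · have hne : -c ≠ -m := fun h => hc (by omega)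
      rw [List.map_cons, PySem.List.remove?_cons_of_ne _ hne, PySem.List.remove?_cons_of_ne _ hc,
        ih (by cases hm with | head => exact absurd rfl hc | tail _ h => exact h)]
      cases PySem.List.remove? cs m <;> simp

-- STACK simulation
theorem stack_sim (pairs : List (List Int)) (buf : List Int)
    (hp : ∀ p ∈ pairs, 2 ≤ p.length) :
    (runA pairs (some (DS.stack buf))).isSome = okRun popStackB pairs buf := by
  induction pairs generalizing buf with
  | nil => rfl
  | cons p rest ih =>
    obtain ⟨m, v, t, rfl⟩ : ∃ m v t, p = m :: v :: t := by
      have := hp p (by simp)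
      match p with
      | m :: v :: t => exact ⟨m, v, t, rfl⟩
    have hrest : ∀ q ∈ rest, 2 ≤ q.length := fun q hq => hp q (by simp [hq])
    rw [runA_cons]
    show (runA rest ((stepA (m :: v :: t) (DS.stack buf)))).isSome = _
    unfold stepA okRun
    simp only [show PySem.List.pyGet? (m :: v :: t) 0 = some m by simp,
      show PySem.List.pyGet? (m :: v :: t) 1 = some v by simp]
    by_cases h1 : m = 1
    · simp only [h1]; simpa [dsThrow] using ih (buf ++ [v]) hrest
    · by_cases h2 : m = 2
      · subst h2
        simp only [show (((2:Int)) = 1) = False by simp, if_false, if_true]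
        cases hb : buf.reverse with
        | nil =>
          have : buf = [] := by simpa using congrArg List.reverse hb
          subst this
          simp [dsRemove, PySem.List.pop?, runA_none]
        | cons c cs =>
          have hbuf : buf = cs.reverse ++ [c] := by
            have := congrArg List.reverse hb; simpa using this
          subst hbuf
          rw [show dsRemove (DS.stack (cs.reverse ++ [c])) = (some c, DS.stack cs.reverse) by
            simp [dsRemove, PySem.List.pop?_last]]
          by_cases hv : c = v
          · simpa [hv, popStackB] using ih cs.reverse hrest
          · simp [hv, runA_none, popStackB]
      · simp only [h1, h2, if_false]
        exact ih buf hrest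

-- QUEUE simulation: A's internal list is B's buffer reversed
theorem queue_sim (pairs : List (List Int)) (buf : List Int)
    (hp : ∀ p ∈ pairs, 2 ≤ p.length) :
    (runA pairs (some (DS.queue buf.reverse))).isSome = okRun popQueueB pairs buf := by
  induction pairs generalizing buf with
  | nil => rfl
  | cons p rest ih =>
    obtain ⟨m, v, t, rfl⟩ : ∃ m v t, p = m :: v :: t := by
      have := hp p (by simp)
      match p with
      | m :: v :: t => exact ⟨m, v, t, rfl⟩
    have hrest : ∀ q ∈ rest, 2 ≤ q.length := fun q hq => hp q (by simp [hq])
    rw [runA_cons]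
    show (runA rest ((stepA (m :: v :: t) (DS.queue buf.reverse)))).isSome = _
    unfold stepA okRun
    simp only [show PySem.List.pyGet? (m :: v :: t) 0 = some m by simp,
      show PySem.List.pyGet? (m :: v :: t) 1 = some v by simp]
    by_cases h1 : m = 1
    · simp only [h1]
      have : (DS.queue (v :: buf.reverse)) = DS.queue ((buf ++ [v]).reverse) := by simp
      simpa [dsThrow, this] using ih (buf ++ [v]) hrest
    · by_cases h2 : m = 2
      · subst h2
        simp only [show (((2:Int)) = 1) = False by simp, if_false, if_true]
        cases hb : buf with
        | nil => simp [dsRemove, PySem.List.pop?, runA_none]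
        | cons c cs =>
          rw [show dsRemove (DS.queue ((c :: cs).reverse)) = (some c, DS.queue cs.reverse) by
            simp [dsRemove, PySem.List.pop?_last]]
          by_cases hv : c = v
          · simpa [hv, popQueueB] using ih cs hrest
          · simp [hv, runA_none, popQueueB]
      · simp only [h1, h2, if_false]
        exact ih buf hrest

-- PRIORITY-QUEUE simulation: A's internal list is B's buffer negated elementwise
theorem pq_sim (pairs : List (List Int)) (buf : List Int)
    (hp : ∀ p ∈ pairs, 2 ≤ p.length) :
    (runA pairs (some (DS.pq (buf.map (fun x => -x))))).isSome = okRun popPqB pairs buf := by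
  induction pairs generalizing buf with
  | nil => rfl
  | cons p rest ih =>
    obtain ⟨m, v, t, rfl⟩ : ∃ m v t, p = m :: v :: t := by
      have := hp p (by simp)
      match p with
      | m :: v :: t => exact ⟨m, v, t, rfl⟩
    have hrest : ∀ q ∈ rest, 2 ≤ q.length := fun q hq => hp q (by simp [hq])
    rw [runA_cons]
    show (runA rest ((stepA (m :: v :: t) (DS.pq (buf.map (fun x => -x)))))).isSome = _
    unfold stepA okRun
    simp only [show PySem.List.pyGet? (m :: v :: t) 0 = some m by simp,
      show PySem.List.pyGet? (m :: v :: t) 1 = some v by simp]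
    by_cases h1 : m = 1
    · subst h1
      simp only [show (((1:Int)) = 2) = False by simp, if_true, if_false]
      rw [show dsThrow (DS.pq (buf.map (fun x => -x))) v = DS.pq ((buf ++ [v]).map (fun x => -x)) by
        simp [dsThrow]]
      exact ih (buf ++ [v]) hrest
    · by_cases h2 : m = 2
      · subst h2
        simp only [show (((2:Int)) = 1) = False by simp, if_false, if_true]
        cases hb : buf with
        | nil =>
          rw [show dsRemove (DS.pq (([]:List Int).map (fun x => -x))) = (none, DS.pq []) from rfl]
          simp [runA_none]
        | cons c cs =>
          have hmax : PySem.List.max? (c :: cs) (fun y => y) = some (List.foldl max c cs) :=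
            PySem.List.max?_id_cons c cs
          have hmin : PySem.List.min? ((c :: cs).map (fun x => -x)) (fun y => y)
              = some (-(List.foldl max c cs)) := by
            rw [List.map_cons, PySem.List.min?_id_cons, foldl_min_neg]
          have hmem : List.foldl max c cs ∈ c :: cs := PySem.List.max?_mem hmax
          have hrem := remove?_map_neg (c :: cs) (List.foldl max c cs) hmem
          rw [show dsRemove (DS.pq ((c :: cs).map (fun x => -x)))
              = (some (List.foldl max c cs),
                 DS.pq (((PySem.List.remove? (c :: cs) (List.foldl max c cs)).getD (c :: cs)).map (fun x => -x))) by
            simp only [dsRemove, hmin, hrem, neg_neg]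
            rcases h : PySem.List.remove? (c :: cs) (List.foldl max c cs) with _ | r
            · exact absurd hmem ((PySem.List.remove?_eq_none_iff _ _).mp h)
            · simp]
          by_cases hv : List.foldl max c cs = v
          · simpa [hv, popPqB, hmax] using
              ih ((PySem.List.remove? (c :: cs) (List.foldl max c cs)).getD (c :: cs)) hrest
          · simp [hv, runA_none, popPqB, hmax]
      · simp only [h1, h2, if_false]
        exact ih buf hrest

-- ===== VERDICT (by name: the statement is the Claim_ definition above) =====
-- the final dict-size branching agrees with B's survivor-list branching, per survivor flags
theorem final_string (xq xp xs : Option DS) (bq bp bs : Bool)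
    (hq : xq.isSome = bq) (hp : xp.isSome = bp) (hs : xs.isSome = bs) :
    (if (List.filterMap (fun ns => ns.2.map ((ns.1, ·)))
          [("queue", xq), ("priority queue", xp), ("stack", xs)]).length = 1 then
       ((List.filterMap (fun ns => ns.2.map ((ns.1, ·)))
          [("queue", xq), ("priority queue", xp), ("stack", xs)]).headD ("", DS.stack [])).1
     else if (List.filterMap (fun ns => ns.2.map ((ns.1, ·)))
          [("queue", xq), ("priority queue", xp), ("stack", xs)]).length > 1 then "not sure"
     else "impossible")
    = (if (List.map Prod.fst (List.filter (fun np => np.2)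
            [("queue", bq), ("priority queue", bp), ("stack", bs)])).length = 1 then
         (List.map Prod.fst (List.filter (fun np => np.2)
            [("queue", bq), ("priority queue", bp), ("stack", bs)])).headD ""
       else if (List.map Prod.fst (List.filter (fun np => np.2)
            [("queue", bq), ("priority queue", bp), ("stack", bs)])).length > 1 then "not sure"
       else "impossible") := by
  subst hq hp hs
  rcases xq with _ | q <;> rcases xp with _ | p <;> rcases xs with _ | st <;> simp

theorem check_input_pairs_spec : Claim_equal_check_input_pairs := by
  intro pairs _ hpre
  unfold Spec_check_input_pairs check_input_pairs check_input_pairs_alt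
  dsimp only
  rw [foldl_checkPair_eq]
  have e1 : List.filterMap (fun ns => (runA pairs (some ns.2)).map ((ns.1, ·)))
        [("queue", DS.queue []), ("priority queue", DS.pq []), ("stack", DS.stack [])]
      = List.filterMap (fun ns => ns.2.map ((ns.1, ·)))
        [("queue", runA pairs (some (DS.queue []))), ("priority queue", runA pairs (some (DS.pq []))),
         ("stack", runA pairs (some (DS.stack [])))] := rfl
  have e2 : List.map Prod.fst (List.filter (fun np => okRun np.2 pairs [])
        [("queue", popQueueB), ("priority queue", popPqB), ("stack", popStackB)])
      = List.map Prod.fst (List.filter (fun np => np.2)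
        [("queue", okRun popQueueB pairs []), ("priority queue", okRun popPqB pairs []),
         ("stack", okRun popStackB pairs [])]) := by
    cases h1 : okRun popQueueB pairs [] <;> cases h2 : okRun popPqB pairs [] <;>
      cases h3 : okRun popStackB pairs [] <;> simp [h1, h2, h3]
  rw [e1, e2]
  have hq := queue_sim pairs [] hpre
  have hpq := pq_sim pairs [] hpre
  have hs := stack_sim pairs [] hpre
  simp only [List.reverse_nil, List.map_nil] at hq hpq hs
  exact final_string _ _ _ _ _ _ hq hpq hs
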